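-- pv_equiv track=rewrite | github.com/LunaMoonax/Target-search | workflow_2/scripts/validate_primers_comprehensive.py | _find_max_dinucleotide_repeat
-- ===== SOURCE A (Python) =====
-- def _find_max_dinucleotide_repeat(sequence):
--     max_repeat = 0
--     for i in range(len(sequence) - 3):
--         dinuc = sequence[i:i+2]
--         repeats = 1
--         for j in range(i + 2, len(sequence) - 1, 2):
--             if sequence[j:j+2] == dinuc: repeats += 1
--             else: break
--         max_repeat = max(max_repeat, repeats)
--     return max_repeat
-- ===== SOURCE B (Python) =====
-- def _find_max_dinucleotide_repeat(sequence):
--     n = len(sequence)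
--     if n <= 3:
--         return 0
--     best = 0
--     prev, prev2 = 1, 1  # run lengths of the dinucleotide chains starting at i + 1 and i + 2
--     for i in range(n - 4, -1, -1):
--         if sequence[i:i+2] == sequence[i+2:i+4]:
--             r = 1 + prev2
--         else:
--             r = 1
--         prev, prev2 = r, prev
--         if r > best:
--             best = r
--     return best
-- ===== Notes on version B (the rewrite author's own statement) =====
-- stated objective: faster
-- what changed: Replaced the restart-a-scan-at-every-index nested loops by a single right-to-left dynamic-programming pass that computes each run length from the run length two positions later (run(i) = 1 + run(i+2) when the adjacent dinucleotides match), keeping only two rolling values and the running maximum.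
import Mathlib
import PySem

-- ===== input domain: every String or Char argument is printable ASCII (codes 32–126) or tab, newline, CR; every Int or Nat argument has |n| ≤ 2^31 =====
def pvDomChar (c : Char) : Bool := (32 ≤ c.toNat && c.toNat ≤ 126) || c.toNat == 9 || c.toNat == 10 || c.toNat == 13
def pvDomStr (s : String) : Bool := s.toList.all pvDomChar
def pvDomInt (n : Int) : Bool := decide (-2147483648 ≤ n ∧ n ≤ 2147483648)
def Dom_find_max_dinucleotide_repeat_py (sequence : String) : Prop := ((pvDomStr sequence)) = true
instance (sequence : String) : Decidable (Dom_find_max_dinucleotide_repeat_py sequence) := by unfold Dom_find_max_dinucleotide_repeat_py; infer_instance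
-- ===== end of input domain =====

-- B replaces A's O(n^2) restart-at-every-index scans by one O(n) right-to-left DP pass (run(i) = 1 + run(i+2) on a match).

-- ===== PORT A =====
-- inner 'for j in range(i+2, len-1, 2)' loop with its break, comparing each dinucleotide slice to dinuc
def pvInnerA (cs : List Char) (dinuc : List Char) : List Int → Int → Int
  | [], repeats => repeats
  | j :: js, repeats =>
    if PySem.List.slice cs (some j) (some (j + 2)) = dinuc then pvInnerA cs dinuc js (repeats + 1)
    else repeats

def find_max_dinucleotide_repeat_py (sequence : String) : Int :=
  let cs := sequence.toList
  let n : Int := PySem.Str.len sequence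
  (PySem.List.pyRange 0 (n - 3) 1).foldl
    (fun max_repeat i =>
      let dinuc := PySem.List.slice cs (some i) (some (i + 2))
      let repeats := pvInnerA cs dinuc (PySem.List.pyRange (i + 2) (n - 1) 2) 1
      max max_repeat repeats) 0

-- ===== PORT B =====
-- loop body of Source B: state (best, prev, prev2); r from the adjacent-dinucleotide comparison and prev2
def pvStepB (cs : List Char) (st : Int × Int × Int) (i : Int) : Int × Int × Int :=
  let r := if PySem.List.slice cs (some i) (some (i + 2)) = PySem.List.slice cs (some (i + 2)) (some (i + 4))
           then 1 + st.2.2 else 1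
  (if r > st.1 then r else st.1, r, st.2.1)

def find_max_dinucleotide_repeat_py_alt (sequence : String) : Int :=
  let cs := sequence.toList
  let n : Int := PySem.Str.len sequence
  if n ≤ 3 then 0
  else ((PySem.List.pyRange (n - 4) (-1) (-1)).foldl (pvStepB cs) (0, 1, 1)).1

-- ===== PRECONDITION & SPEC =====
def Spec_find_max_dinucleotide_repeat_py (sequence : String) (out : Int) : Prop := out = find_max_dinucleotide_repeat_py_alt sequence
instance (sequence : String) (out : Int) : Decidable (Spec_find_max_dinucleotide_repeat_py sequence out) := by unfold Spec_find_max_dinucleotide_repeat_py; infer_instance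

-- ===== CLAIM (what is proved, stated in full; the proofs are below) =====
def Claim_equal_find_max_dinucleotide_repeat_py : Prop := ∀ (sequence : String), Dom_find_max_dinucleotide_repeat_py sequence → Spec_find_max_dinucleotide_repeat_py sequence (find_max_dinucleotide_repeat_py sequence)

-- ===== LEMMAS AND PROOFS =====

-- the dinucleotide at position i
def pvDin (cs : List Char) (i : Nat) : List Char := (cs.drop i).take 2

-- reference value: length of the chain of equal consecutive dinucleotides starting at i (stride 2)
def pvRun (cs : List Char) (i : Nat) : Int :=
  if h : i + 4 ≤ cs.length ∧ pvDin cs i = pvDin cs (i + 2) then pvRun cs (i + 2) + 1 else 1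
termination_by cs.length - i
decreasing_by omega

-- max of pvRun over 0..k
def pvM (cs : List Char) : Nat → Int
  | 0 => pvRun cs 0
  | k + 1 => max (pvM cs k) (pvRun cs (k + 1))

lemma slice_din (cs : List Char) (i : Nat) :
    PySem.List.slice cs (some (i : Int)) (some ((i : Int) + 2)) = pvDin cs i := by
  rw [PySem.List.slice_toNat cs (by omega) (by omega)]
  have h1 : ((i : Int) + 2).toNat = i + 2 := by omega
  have h2 : ((i : Int)).toNat = i := by omega
  have h3 : i + 2 - i = 2 := by omega
  rw [h1, h2, h3, pvDin]

lemma run_one (cs : List Char) (i : Nat) (h : cs.length < i + 4) : pvRun cs i = 1 := by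
  rw [pvRun]; rw [dif_neg]; omega

lemma run_eq (cs : List Char) (i : Nat) (h : i + 4 ≤ cs.length) :
    pvRun cs i = if pvDin cs i = pvDin cs (i + 2) then pvRun cs (i + 2) + 1 else 1 := by
  rw [pvRun]
  by_cases hd : pvDin cs i = pvDin cs (i + 2)
  · rw [dif_pos ⟨h, hd⟩, if_pos hd]
  · rw [dif_neg (by tauto), if_neg hd]

lemma pyRange_two_nil (a b : Int) (h : b ≤ a) : PySem.List.pyRange a b 2 = [] := by
  rw [PySem.List.pyRange_of_pos a b (by norm_num)]
  simp [Int.not_lt.mpr h]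

lemma pyRange_two_cons (a b : Int) (h : a < b) :
    PySem.List.pyRange a b 2 = a :: PySem.List.pyRange (a + 2) b 2 := by
  rw [PySem.List.pyRange_of_pos a b (by norm_num), PySem.List.pyRange_of_pos (a + 2) b (by norm_num)]
  rw [if_pos h]
  by_cases h2 : a + 2 < b
  · rw [if_pos h2]
    have hm : ((b - a + 2 - 1) / 2).toNat = ((b - (a + 2) + 2 - 1) / 2).toNat + 1 := by omega
    rw [hm, List.range_succ_eq_map]
    simp only [List.map_cons, List.map_map]
    congr 1
    · push_cast; ring
    · apply List.map_congr_left; intro x _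
      simp only [Function.comp_apply]; push_cast; ring
  · rw [if_neg h2]
    have hm : ((b - a + 2 - 1) / 2).toNat = 1 := by omega
    rw [hm]
    simp

lemma innerA_run (cs : List Char) : ∀ (fuel i : Nat) (r : Int), cs.length - i ≤ fuel →
    pvInnerA cs (pvDin cs i) (PySem.List.pyRange ((i : Int) + 2) ((cs.length : Int) - 1) 2) r
      = r + pvRun cs i - 1 := by
  intro fuel
  induction fuel with
  | zero =>
    intro i r hf
    rw [pyRange_two_nil _ _ (by omega), run_one cs i (by omega), pvInnerA]
    ring
  | succ fuel ih =>
    intro i r hf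
    by_cases hb : i + 4 ≤ cs.length
    · rw [pyRange_two_cons _ _ (by omega)]
      have hc2 : (i : Int) + 2 = ((i + 2 : Nat) : Int) := by push_cast; ring
      simp only [pvInnerA]
      rw [hc2, slice_din cs (i + 2)]
      by_cases hd : pvDin cs i = pvDin cs (i + 2)
      · rw [if_pos hd.symm, hd]
        rw [ih (i + 2) (r + 1) (by omega)]
        rw [run_eq cs i hb, if_pos hd]
        ring
      · rw [if_neg (fun e => hd e.symm)]
        rw [run_eq cs i hb, if_neg hd]
        ring
    · rw [pyRange_two_nil _ _ (by omega), run_one cs i (by omega), pvInnerA]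
      ring

lemma Afold (cs : List Char) : ∀ (k : Nat) (init : Int),
    (PySem.List.pyRange 0 ((k : Int) + 1) 1).foldl (fun m i => max m (pvRun cs i.toNat)) init
      = max init (pvM cs k) := by
  intro k
  induction k with
  | zero =>
    intro init
    rw [show ((0 : Nat) : Int) + 1 = 0 + 1 by norm_num, PySem.List.pyRange_one_singleton]
    simp [pvM]
  | succ k ih =>
    intro init
    rw [show ((k + 1 : Nat) : Int) + 1 = ((k : Int) + 1) + 1 by push_cast; ring]
    rw [PySem.List.pyRange_one_succ_right (by omega), List.foldl_append, ih]
    simp only [List.foldl_cons, List.foldl_nil]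
    have ht : ((k : Int) + 1).toNat = k + 1 := by omega
    rw [ht, pvM, max_assoc]

lemma stepB_eq (cs : List Char) (k : Nat) (h : k + 4 ≤ cs.length) (st : Int × Int × Int)
    (h1 : st.2.1 = pvRun cs (k + 1)) (h2 : st.2.2 = pvRun cs (k + 2)) :
    pvStepB cs st (k : Int) = (max st.1 (pvRun cs k), pvRun cs k, pvRun cs (k + 1)) := by
  simp only [pvStepB]
  have hc2 : (k : Int) + 2 = ((k + 2 : Nat) : Int) := by push_cast; ring
  have hc4 : (k : Int) + 4 = ((k + 2 : Nat) : Int) + 2 := by push_cast; ring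
  rw [slice_din cs k, hc2, hc4, slice_din cs (k + 2), h1, h2]
  have hr : (if pvDin cs k = pvDin cs (k + 2) then 1 + pvRun cs (k + 2) else 1) = pvRun cs k := by
    rw [run_eq cs k h]; split_ifs <;> ring
  rw [hr]
  have : (if pvRun cs k > st.1 then pvRun cs k else st.1) = max st.1 (pvRun cs k) := by
    rcases max_cases st.1 (pvRun cs k) with ⟨he, hle⟩ | ⟨he, hlt⟩ <;> rw [he] <;> split_ifs <;> omega
  rw [this]

lemma Bfold (cs : List Char) : ∀ (k : Nat), k + 4 ≤ cs.length → ∀ (st : Int × Int × Int),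
    st.2.1 = pvRun cs (k + 1) → st.2.2 = pvRun cs (k + 2) →
    ((PySem.List.pyRange (k : Int) (-1) (-1)).foldl (pvStepB cs) st).1 = max st.1 (pvM cs k) := by
  intro k
  induction k with
  | zero =>
    intro hk st h1 h2
    rw [PySem.List.pyRange_neg_one_cons (by omega)]
    rw [show ((0 : Nat) : Int) - 1 = -1 by norm_num, PySem.List.pyRange_neg_one_eq_nil (le_refl _)]
    simp only [List.foldl_cons, List.foldl_nil]
    rw [stepB_eq cs 0 hk st h1 h2, pvM]
  | succ k ih =>
    intro hk st h1 h2
    rw [PySem.List.pyRange_neg_one_cons (by omega)]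
    rw [show ((k + 1 : Nat) : Int) - 1 = (k : Int) by push_cast; ring]
    simp only [List.foldl_cons]
    rw [stepB_eq cs (k + 1) hk st h1 h2]
    rw [ih (by omega) _ rfl rfl]
    rw [pvM, max_assoc, max_comm (pvRun cs (k + 1)) (pvM cs k)]

-- ===== VERDICT (by name: the statement is the Claim_ definition above) =====
theorem find_max_dinucleotide_repeat_py_spec : Claim_equal_find_max_dinucleotide_repeat_py := by
  intro sequence _
  unfold Spec_find_max_dinucleotide_repeat_py find_max_dinucleotide_repeat_py find_max_dinucleotide_repeat_py_alt
  simp only [PySem.Str.len_eq]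
  set cs := sequence.toList with hcs
  by_cases hn : (cs.length : Int) ≤ 3
  · rw [if_pos hn, PySem.List.pyRange_one_eq_nil (by omega)]
    rfl
  · rw [if_neg hn]
    have h4 : 4 ≤ cs.length := by omega
    -- A side
    have hA : (PySem.List.pyRange 0 ((cs.length : Int) - 3) 1).foldl
        (fun max_repeat i =>
          max max_repeat (pvInnerA cs (PySem.List.slice cs (some i) (some (i + 2)))
            (PySem.List.pyRange (i + 2) ((cs.length : Int) - 1) 2) 1)) 0
        = (PySem.List.pyRange 0 ((cs.length : Int) - 3) 1).foldl
            (fun m i => max m (pvRun cs i.toNat)) 0 := by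
      apply PySem.List.foldl_congr_mem
      intro acc x hx
      have hx0 : 0 ≤ x := (PySem.List.mem_pyRange_one.mp hx).1
      have hxe : x = ((x.toNat : Nat) : Int) := by omega
      rw [hxe, slice_din cs x.toNat, innerA_run cs cs.length x.toNat 1 (by omega),
        Int.toNat_natCast]
      ring_nf
    rw [hA]
    rw [show (cs.length : Int) - 3 = ((cs.length - 4 : Nat) : Int) + 1 by omega]
    rw [Afold cs (cs.length - 4) 0]
    -- B side
    rw [show (cs.length : Int) - 4 = ((cs.length - 4 : Nat) : Int) by omega]
    rw [Bfold cs (cs.length - 4) (by omega) (0, 1, 1)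
      (by show (1 : Int) = _; rw [run_one cs (cs.length - 4 + 1) (by omega)])
      (by show (1 : Int) = _; rw [run_one cs (cs.length - 4 + 2) (by omega)])]
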